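-- pv_equiv track=rewrite | github.com/Talent-zhao/-TextCNN-Django- | app/trainViews.py | _infer_default_train_data_locale
-- ===== SOURCE A (Python) =====
-- def _locale_token_for_csv_rel(rel):
--     """训练页数据区域：zh、en，或未放在 zh/en 子目录下的 other。"""
--     r = (rel or '').replace('\\', '/').lower()
--     if '/zh/' in r:
--         return 'zh'
--     if '/en/' in r:
--         return 'en'
--     return 'other'
--
-- def _infer_default_train_data_locale(default_csv, csv_choices):
--     """
--     「数据语言」下拉初始值：与 default_csv 所在区域一致；
--     否则优先有 zh 时选 zh，其次 en，否则全部。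
--     """
--     t = _locale_token_for_csv_rel(default_csv)
--     if t in ('zh', 'en'):
--         return t
--     choices = csv_choices or []
--     if any(_locale_token_for_csv_rel(c) == 'zh' for c in choices):
--         return 'zh'
--     if any(_locale_token_for_csv_rel(c) == 'en' for c in choices):
--         return 'en'
--     return 'all'
-- ===== SOURCE B (Python) =====
-- def _norm(p):
--     return (p or '').replace('\\', '/').lower()
--
-- def _infer_default_train_data_locale(default_csv, csv_choices):
--     d = _norm(default_csv)
--     if '/zh/' in d:
--         return 'zh'
--     if '/en/' in d:
--         return 'en'
--     # one pass with a seen_en accumulator: return 'zh' at the first zh path,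
--     # remember whether an en path was seen, decide at the end
--     seen_en = False
--     for c in (csv_choices or []):
--         r = _norm(c)
--         if '/zh/' in r:
--             return 'zh'
--         seen_en = seen_en or '/en/' in r
--     return 'en' if seen_en else 'all'
-- ===== Notes on version B (the rewrite author's own statement) =====
-- stated objective: alternative
-- what changed: Drops the locale-token helper and A's two staged any() scans; B normalizes each path inline and makes a single pass over the choices with a seen_en accumulator, returning 'zh' at the first zh path and deciding en/all at the end.
import Mathlib
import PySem

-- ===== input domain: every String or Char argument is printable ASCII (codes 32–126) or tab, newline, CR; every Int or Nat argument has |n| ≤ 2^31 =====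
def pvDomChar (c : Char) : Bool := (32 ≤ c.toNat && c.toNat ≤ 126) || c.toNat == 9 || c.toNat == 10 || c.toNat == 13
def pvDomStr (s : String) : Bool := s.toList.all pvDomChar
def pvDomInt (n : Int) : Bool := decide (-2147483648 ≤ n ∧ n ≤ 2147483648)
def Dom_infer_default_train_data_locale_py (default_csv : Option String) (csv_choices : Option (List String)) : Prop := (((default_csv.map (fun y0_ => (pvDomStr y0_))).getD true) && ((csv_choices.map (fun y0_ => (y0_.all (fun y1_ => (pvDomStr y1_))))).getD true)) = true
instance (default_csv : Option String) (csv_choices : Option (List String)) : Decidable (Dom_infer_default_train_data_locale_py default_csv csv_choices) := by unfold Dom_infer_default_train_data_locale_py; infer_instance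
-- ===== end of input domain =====

-- B replaces A's token helper and its two staged any() scans by one recursive pass
-- over the choices with a seen_en accumulator (alternative decomposition, same cost).

-- ===== PORT A =====
-- _locale_token_for_csv_rel (A side)
def locale_token_for_csv_rel (rel : Option String) : String :=
  let r := PySem.Str.lower (PySem.Str.replace (rel.getD "") "\\" "/")
  if PySem.Str.isIn "/zh/" r then "zh"
  else if PySem.Str.isIn "/en/" r then "en"
  else "other"

def infer_default_train_data_locale_py (default_csv : Option String) (csv_choices : Option (List String)) : String :=
  let t := locale_token_for_csv_rel default_csv
  if t = "zh" ∨ t = "en" then t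
  else
    let choices := csv_choices.getD []
    if choices.any (fun c => locale_token_for_csv_rel (some c) == "zh") then "zh"
    else if choices.any (fun c => locale_token_for_csv_rel (some c) == "en") then "en"
    else "all"

-- ===== PORT B =====
-- _norm (B side)
def pvNorm (p : Option String) : String :=
  PySem.Str.lower (PySem.Str.replace (p.getD "") "\\" "/")

-- B's for-loop over the choices with its seen_en accumulator and early return
def pvScan : List String → Bool → String
  | [], seen_en => if seen_en then "en" else "all"
  | c :: rest, seen_en =>
    let r := pvNorm (some c)
    if PySem.Str.isIn "/zh/" r then "zh"
    else pvScan rest (seen_en || PySem.Str.isIn "/en/" r)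

def infer_default_train_data_locale_py_alt (default_csv : Option String) (csv_choices : Option (List String)) : String :=
  let d := pvNorm default_csv
  if PySem.Str.isIn "/zh/" d then "zh"
  else if PySem.Str.isIn "/en/" d then "en"
  else pvScan (csv_choices.getD []) false

-- ===== PRECONDITION & SPEC =====
def Spec_infer_default_train_data_locale_py (default_csv : Option String) (csv_choices : Option (List String)) (out : String) : Prop := out = infer_default_train_data_locale_py_alt default_csv csv_choices
instance (default_csv : Option String) (csv_choices : Option (List String)) (out : String) : Decidable (Spec_infer_default_train_data_locale_py default_csv csv_choices out) := by unfold Spec_infer_default_train_data_locale_py; infer_instance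

-- ===== CLAIM (what is proved, stated in full; the proofs are below) =====
def Claim_equal_infer_default_train_data_locale_py : Prop := ∀ (default_csv : Option String) (csv_choices : Option (List String)), Dom_infer_default_train_data_locale_py default_csv csv_choices → Spec_infer_default_train_data_locale_py default_csv csv_choices (infer_default_train_data_locale_py default_csv csv_choices)

-- ===== LEMMAS AND PROOFS =====

theorem tokA_eq (r : Option String) :
    locale_token_for_csv_rel r =
      if PySem.Str.isIn "/zh/" (pvNorm r) then "zh"
      else if PySem.Str.isIn "/en/" (pvNorm r) then "en"
      else "other" := rfl

-- B's accumulator pass equals the staged decision it folds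
theorem pvScan_eq (cs : List String) (b : Bool) :
    pvScan cs b =
      if cs.any (fun c => PySem.Str.isIn "/zh/" (pvNorm (some c))) then "zh"
      else if b || cs.any (fun c => PySem.Str.isIn "/en/" (pvNorm (some c))) then "en"
      else "all" := by
  induction cs generalizing b with
  | nil => cases b <;> rfl
  | cons c cs ih =>
      have hstep : pvScan (c :: cs) b =
          if PySem.Str.isIn "/zh/" (pvNorm (some c)) then "zh"
          else pvScan cs (b || PySem.Str.isIn "/en/" (pvNorm (some c))) := rfl
      rw [hstep, List.any_cons, List.any_cons]
      by_cases hz : PySem.Str.isIn "/zh/" (pvNorm (some c)) = true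
      · rw [if_pos hz, hz, Bool.true_or, if_pos rfl]
      · rw [Bool.not_eq_true] at hz
        rw [if_neg (by rw [hz]; exact Bool.false_ne_true), ih, hz, Bool.false_or,
          Bool.or_assoc]

theorem pvAnyCongr {α : Type} (l : List α) (p q : α → Bool)
    (h : ∀ a ∈ l, p a = q a) : l.any p = l.any q := by
  induction l with
  | nil => rfl
  | cons a l ih =>
      rw [List.any_cons, List.any_cons, h a (List.mem_cons_self ..),
        ih (fun x hx => h x (List.mem_cons_of_mem _ hx))]

theorem tokA_zh_iff (c : String) :
    (locale_token_for_csv_rel (some c) == "zh")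
      = PySem.Str.isIn "/zh/" (pvNorm (some c)) := by
  rw [tokA_eq]
  by_cases hz : PySem.Str.isIn "/zh/" (pvNorm (some c)) = true
  · rw [if_pos hz, hz]; decide
  · rw [Bool.not_eq_true] at hz
    rw [hz, if_neg Bool.false_ne_true]
    split_ifs <;> decide

-- for a path with no '/zh/', token = "en" coincides with '/en/'-membership
theorem tokA_en_of_no_zh (c : String)
    (hz : PySem.Str.isIn "/zh/" (pvNorm (some c)) = false) :
    (locale_token_for_csv_rel (some c) == "en")
      = PySem.Str.isIn "/en/" (pvNorm (some c)) := by
  rw [tokA_eq, hz, if_neg Bool.false_ne_true]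
  by_cases he : PySem.Str.isIn "/en/" (pvNorm (some c)) = true
  · rw [if_pos he, he]; decide
  · rw [Bool.not_eq_true] at he
    rw [he, if_neg Bool.false_ne_true]
    decide

-- ===== VERDICT (by name: the statement is the Claim_ definition above) =====
theorem infer_default_train_data_locale_py_spec : Claim_equal_infer_default_train_data_locale_py := by
  intro d cs _
  unfold Spec_infer_default_train_data_locale_py
  simp only [infer_default_train_data_locale_py, infer_default_train_data_locale_py_alt]
  rw [tokA_eq d]
  by_cases hz : PySem.Str.isIn "/zh/" (pvNorm d) = true
  · rw [if_pos hz, if_pos hz, if_pos (Or.inl rfl)]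
  · rw [Bool.not_eq_true] at hz
    rw [hz, if_neg Bool.false_ne_true, if_neg Bool.false_ne_true]
    by_cases he : PySem.Str.isIn "/en/" (pvNorm d) = true
    · rw [if_pos he, if_pos he, if_pos (Or.inr rfl)]
    · rw [Bool.not_eq_true] at he
      rw [he, if_neg Bool.false_ne_true, if_neg Bool.false_ne_true,
        if_neg (by decide : ¬("other" = "zh" ∨ "other" = "en")), pvScan_eq, Bool.false_or]
      have hzh : ((cs.getD []).any (fun c => locale_token_for_csv_rel (some c) == "zh"))
          = ((cs.getD []).any (fun c => PySem.Str.isIn "/zh/" (pvNorm (some c)))) :=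
        pvAnyCongr _ _ _ (fun c _ => tokA_zh_iff c)
      rw [hzh]
      by_cases hAz : ((cs.getD []).any (fun c => PySem.Str.isIn "/zh/" (pvNorm (some c)))) = true
      · rw [if_pos hAz, if_pos hAz]
      · rw [Bool.not_eq_true] at hAz
        have hen : ((cs.getD []).any (fun c => locale_token_for_csv_rel (some c) == "en"))
            = ((cs.getD []).any (fun c => PySem.Str.isIn "/en/" (pvNorm (some c)))) :=
          pvAnyCongr _ _ _ (fun c hc => tokA_en_of_no_zh c
            (Bool.eq_false_iff.mpr (List.any_eq_false.mp hAz c hc)))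
        rw [hAz, if_neg Bool.false_ne_true, if_neg Bool.false_ne_true, hen]
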